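-- pv_equiv track=rewrite | github.com/LutovaDaria/Alg_4353_Lutova_lab2_sem4 | huffman_codec.py | read_huffman_symbol
-- ===== SOURCE A (Python) =====
-- def read_huffman_symbol(bits, pos, inverse_table):
--     """
--     Read one Huffman symbol from bitstring.
--     Returns (symbol, new_pos).
--     """
--     code = ""
--     while pos < len(bits):
--         code += bits[pos]
--         pos += 1
--         if code in inverse_table:
--             return inverse_table[code], pos
--     raise ValueError("Invalid Huffman stream")
-- ===== SOURCE B (Python) =====
-- def read_huffman_symbol(bits, pos, inverse_table):
--     """
--     Read one Huffman symbol from bitstring.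
--     Returns (symbol, new_pos).
--     Probes only the distinct codeword lengths present in the table,
--     shortest first, instead of growing a candidate bit by bit.
--     """
--     n = len(bits)
--     for length in sorted({len(k) for k in inverse_table if k}):
--         if pos + length <= n:
--             candidate = bits[pos:pos + length]
--             if candidate in inverse_table:
--                 return inverse_table[candidate], pos + length
--     raise ValueError("Invalid Huffman stream")
-- ===== Notes on version B (the rewrite author's own statement) =====
-- stated objective: alternative
-- what changed: Instead of growing a candidate string one bit at a time and testing each prefix, B precomputes the sorted set of distinct codeword lengths and probes only those lengths with a direct slice-and-lookup, returning at the shortest matching length.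
-- outside the precondition, e.g. on read_huffman_symbol('ab', -1, {'ba': 'X'}): A returns ('X', 1), B raises ValueError
import Mathlib
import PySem

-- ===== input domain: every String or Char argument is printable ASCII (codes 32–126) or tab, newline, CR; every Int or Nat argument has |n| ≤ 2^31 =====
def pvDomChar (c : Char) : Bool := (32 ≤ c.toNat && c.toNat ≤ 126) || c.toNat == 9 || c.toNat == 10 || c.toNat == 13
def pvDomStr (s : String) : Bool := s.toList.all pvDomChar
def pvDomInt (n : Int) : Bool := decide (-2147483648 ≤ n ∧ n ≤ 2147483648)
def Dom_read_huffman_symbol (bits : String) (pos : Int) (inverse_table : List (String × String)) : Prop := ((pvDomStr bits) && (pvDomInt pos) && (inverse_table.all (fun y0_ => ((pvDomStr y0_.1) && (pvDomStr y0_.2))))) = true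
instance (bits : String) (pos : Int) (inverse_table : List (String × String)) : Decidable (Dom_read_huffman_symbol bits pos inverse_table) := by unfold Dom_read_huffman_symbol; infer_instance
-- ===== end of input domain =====

-- B probes only the distinct codeword lengths present in the table (sorted ascending) with a
-- direct slice-and-lookup, instead of A's bit-by-bit growing-prefix scan; same result on Pre_.

-- ===== PORT A =====
-- while pos < len(bits): code += bits[pos]; pos += 1; if code in table: return table[code], pos
-- ("", pos) stands in for the raises (ValueError at exhaustion / IndexError at pos < -len); both lie outside Pre_.
def pvA_go (tbl : PySem.Dict String String) (bits : List Char) (code : List Char) (pos : Int) : String × Int :=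
  if _h : pos < (bits.length : Int) then
    match PySem.List.pyGet? bits pos with
    | none => ("", pos)
    | some c =>
      match hm : tbl.get? (String.ofList (code ++ [c])) with
      | some v => (v, pos + 1)
      | none => pvA_go tbl bits (code ++ [c]) (pos + 1)
  else ("", pos)
termination_by ((bits.length : Int) - pos).toNat
decreasing_by omega

def read_huffman_symbol (bits : String) (pos : Int) (inverse_table : List (String × String)) : String × Int :=
  pvA_go (PySem.Dict.mk inverse_table) bits.toList [] pos

-- ===== PORT B =====
-- for length in sorted({len(k) for k in inverse_table if k}): if pos+length<=n and bits[pos:pos+length] in table: return …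
def pvB_go (tbl : PySem.Dict String String) (bits : List Char) (n : Int) (pos : Int) : List Int → String × Int
  | [] => ("", pos)   -- raise ValueError; outside Pre_
  | l :: rest =>
    if pos + l ≤ n then
      match tbl.get? (String.ofList (PySem.List.slice bits (some pos) (some (pos + l)))) with
      | some v => (v, pos + l)
      | none => pvB_go tbl bits n pos rest
    else pvB_go tbl bits n pos rest

def read_huffman_symbol_alt (bits : String) (pos : Int) (inverse_table : List (String × String)) : String × Int :=
  let L := bits.toList
  let lengths := PySem.List.sorted
    (PySem.Set.ofList ((inverse_table.map Prod.fst).filterMap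
      (fun k => if k = "" then none else some ((k.toList.length : Int)))))
    (fun x => x) false
  pvB_go (PySem.Dict.mk inverse_table) L (L.length : Int) pos lengths

-- ===== PRECONDITION & SPEC =====
-- Pre_ excludes (a) inputs where A raises (no codeword matches any prefix starting at pos, incl. pos past
-- the end: ValueError; pos < -len: IndexError), and (b) negative pos, on which A's per-character negative
-- indexing reads the string's suffix and then wraps to its start — an accidental traversal neither
-- implementation's reading of 'position in the bitstream' would specify (A may return there, B raises).
def Pre_read_huffman_symbol (bits : String) (pos : Int) (inverse_table : List (String × String)) : Prop :=
  0 ≤ pos ∧ ∃ m ∈ List.range (bits.toList.length + 1), 1 ≤ m ∧ pos + m ≤ bits.toList.length ∧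
    ((PySem.Dict.mk inverse_table).get?
      (String.ofList (PySem.List.slice bits.toList (some pos) (some (pos + m))))).isSome
instance (bits : String) (pos : Int) (inverse_table : List (String × String)) : Decidable (Pre_read_huffman_symbol bits pos inverse_table) := by unfold Pre_read_huffman_symbol; infer_instance

def pvWitness_read_huffman_symbol : String × Int × (List (String × String)) :=
  ("0011", 0, [("00", "a"), ("01", "b"), ("1", "c")])

def Spec_read_huffman_symbol (bits : String) (pos : Int) (inverse_table : List (String × String)) (out : String × Int) : Prop := out = read_huffman_symbol_alt bits pos inverse_table
instance (bits : String) (pos : Int) (inverse_table : List (String × String)) (out : String × Int) : Decidable (Spec_read_huffman_symbol bits pos inverse_table out) := by unfold Spec_read_huffman_symbol; infer_instance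

-- ===== CLAIM (what is proved, stated in full; the proofs are below) =====
def Claim_equal_read_huffman_symbol : Prop := ∀ (bits : String) (pos : Int) (inverse_table : List (String × String)), Dom_read_huffman_symbol bits pos inverse_table → Pre_read_huffman_symbol bits pos inverse_table → Spec_read_huffman_symbol bits pos inverse_table (read_huffman_symbol bits pos inverse_table)

-- ===== LEMMAS AND PROOFS =====

-- find? on a strictly increasing list returns the least element satisfying the predicate
theorem pv_find?_le {α : Type} [LinearOrder α] {l : List α} {p : α → Bool} {a : α}
    (hinc : l.Pairwise (· < ·)) (hfind : l.find? p = some a) :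
    ∀ b ∈ l, p b = true → a ≤ b := by
  induction l with
  | nil => simp at hfind
  | cons x xs ih =>
    rcases List.pairwise_cons.mp hinc with ⟨hx, hxs⟩
    by_cases hpx : p x = true
    · rw [List.find?_cons_of_pos hpx] at hfind
      cases hfind
      intro b hb _
      rcases List.mem_cons.mp hb with rfl | hb
      · exact le_refl _
      · exact le_of_lt (hx _ hb)
    · rw [List.find?_cons_of_neg (by simpa using hpx)] at hfind
      intro b hb hpb
      rcases List.mem_cons.mp hb with rfl | hb
      · exact absurd hpb hpx
      · exact ih hxs hfind b hb hpb

-- A's loop: characterised by the first m ≥ 1 (scanned in order) with code ++ bits[q:q+m] a key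
theorem pvA_go_eq (tbl : PySem.Dict String String) (L : List Char) :
    ∀ (d q : Nat), q + d = L.length → ∀ (code : List Char),
    pvA_go tbl L code (q : Int) =
      match (List.range' 1 d).find?
          (fun m => (tbl.get? (String.ofList (code ++ (L.drop q).take m))).isSome) with
      | some m => ((tbl.get? (String.ofList (code ++ (L.drop q).take m))).getD "", ((q + m : Nat) : Int))
      | none => ("", (L.length : Int)) := by
  intro d
  induction d with
  | zero =>
    intro q hq code
    rw [pvA_go]
    simp [hq.symm]
  | succ d ih =>
    intro q hq code
    have hqlt : q < L.length := by omega
    rw [pvA_go]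
    rw [dif_pos (by exact_mod_cast hqlt)]
    rw [PySem.List.pyGet?_ofNat L q hqlt]
    dsimp only
    have hdrop : L.drop q = L[q] :: L.drop (q + 1) := List.drop_eq_getElem_cons hqlt
    have hrange : List.range' 1 (d + 1) = 1 :: List.range' 2 d := by
      rw [List.range'_succ]
    have htake1 : (L.drop q).take 1 = [L[q]] := by rw [hdrop]; rfl
    cases hm : tbl.get? (String.ofList (code ++ [L[q]])) with
    | some v =>
      have hp1 : ((fun m => (tbl.get? (String.ofList (code ++ (L.drop q).take m))).isSome) 1) = true := by
        simp only; rw [htake1, hm]; rfl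
      rw [hrange, List.find?_cons_of_pos (p := fun m => (tbl.get? (String.ofList (code ++ (L.drop q).take m))).isSome) hp1]
      dsimp only
      simp only [htake1, hm, Option.getD_some, Prod.mk.injEq]
      exact ⟨trivial, by push_cast; ring⟩
    | none =>
      have hp1 : ¬ (((fun m => (tbl.get? (String.ofList (code ++ (L.drop q).take m))).isSome) 1) = true) := by
        simp only; rw [htake1, hm]; simp
      rw [hrange, List.find?_cons_of_neg (p := fun m => (tbl.get? (String.ofList (code ++ (L.drop q).take m))).isSome) hp1]
      dsimp only
      have hcast : ((q : Int) + 1) = ((q + 1 : Nat) : Int) := by push_cast; ring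
      rw [hcast, ih (q + 1) (by omega) (code ++ [L[q]])]
      have hshift : ∀ m : Nat, code ++ (L.drop q).take (m + 1)
          = (code ++ [L[q]]) ++ (L.drop (q + 1)).take m := by
        intro m
        rw [hdrop, List.take_succ_cons, List.append_assoc]
        rfl
      have hmap : List.range' 2 d = (List.range' 1 d).map (· + 1) := by
        have h1 := List.map_add_range' (a := 1) 1 d 1
        rw [← h1]
        simp [Nat.add_comm]
      have hpredeq : ((fun m => (tbl.get? (String.ofList (code ++ (L.drop q).take m))).isSome) ∘ (· + 1))
          = (fun m => (tbl.get? (String.ofList ((code ++ [L[q]]) ++ (L.drop (q+1)).take m))).isSome) := by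
        funext m
        simp only [Function.comp_apply]
        rw [hshift m]
      rw [hmap, List.find?_map, hpredeq]
      cases hf : (List.range' 1 d).find?
          (fun m => (tbl.get? (String.ofList ((code ++ [L[q]]) ++ (L.drop (q+1)).take m))).isSome) with
      | none => simp
      | some m =>
        simp only [Option.map_some]
        rw [hshift m]
        simp only [Prod.mk.injEq]
        exact ⟨trivial, by push_cast; ring⟩

-- B's loop: the first length in the list that fits and whose slice is a key
theorem pvB_go_eq (tbl : PySem.Dict String String) (L : List Char) (n pos : Int) :
    ∀ (lengths : List Int),
    pvB_go tbl L n pos lengths =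
      match lengths.find? (fun l => decide (pos + l ≤ n) &&
          (tbl.get? (String.ofList (PySem.List.slice L (some pos) (some (pos + l))))).isSome) with
      | some l => ((tbl.get? (String.ofList (PySem.List.slice L (some pos) (some (pos + l))))).getD "", pos + l)
      | none => ("", pos) := by
  intro lengths
  induction lengths with
  | nil => rfl
  | cons l rest ih =>
    rw [pvB_go]
    by_cases hle : pos + l ≤ n
    · rw [if_pos hle]
      cases hm : tbl.get? (String.ofList (PySem.List.slice L (some pos) (some (pos + l)))) with
      | some v =>
        rw [List.find?_cons_of_pos (by simp [hle, hm])]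
        simp [hm]
      | none =>
        rw [List.find?_cons_of_neg (by simp [hm])]
        exact ih
    · rw [if_neg hle]
      rw [List.find?_cons_of_neg (by simp [hle])]
      exact ih

-- ===== VERDICT (by name: the statement is the Claim_ definition above) =====
theorem read_huffman_symbol_spec : Claim_equal_read_huffman_symbol := by
  intro bits pos inverse_table _ hpre
  obtain ⟨hpos, m, hmrange, hm1, hmle, hmsome⟩ := hpre
  unfold Spec_read_huffman_symbol read_huffman_symbol read_huffman_symbol_alt
  set tbl := PySem.Dict.mk inverse_table with htbl
  set L := bits.toList with hL
  set n := L.length with hn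
  obtain ⟨p, rfl⟩ : ∃ p : Nat, pos = (p : Int) := ⟨pos.toNat, (Int.toNat_of_nonneg hpos).symm⟩
  have hple : p + m ≤ n := by exact_mod_cast hmle
  -- rewrite the Pre_ witness slice to drop/take
  have hslice : ∀ k : Nat, PySem.List.slice L (some (p : Int)) (some ((p : Int) + (k : Int)))
      = (L.drop p).take k := fun k => PySem.List.slice_natCast_add L p k
  rw [hslice m] at hmsome
  -- A side
  have hA := pvA_go_eq tbl L (n - p) p (by omega) []
  simp only [List.nil_append] at hA
  set P : Nat → Bool := fun k => (tbl.get? (String.ofList ((L.drop p).take k))).isSome with hP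
  have hmem_m : m ∈ List.range' 1 (n - p) := by
    rw [List.mem_range']
    exact ⟨m - 1, by omega, by omega⟩
  have hfindA : (List.range' 1 (n - p)).find? P ≠ none := by
    intro hnone
    rw [List.find?_eq_none] at hnone
    exact (hnone m hmem_m) hmsome
  obtain ⟨m₀, hm₀⟩ := Option.ne_none_iff_exists'.mp hfindA
  have hm₀mem : m₀ ∈ List.range' 1 (n - p) := List.mem_of_find?_eq_some hm₀
  have hm₀P : P m₀ = true := List.find?_some hm₀
  have hm₀range : 1 ≤ m₀ ∧ m₀ ≤ n - p := by
    obtain ⟨i, hi, hieq⟩ := List.mem_range'.mp hm₀mem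
    omega
  have hm₀min : ∀ k ∈ List.range' 1 (n - p), P k = true → m₀ ≤ k :=
    pv_find?_le (List.pairwise_lt_range' (s := 1) (n := n - p) 1) hm₀
  -- B side
  set lengths := PySem.List.sorted
    (PySem.Set.ofList ((inverse_table.map Prod.fst).filterMap
      (fun k => if k = "" then none else some ((k.toList.length : Int)))))
    (fun x => x) false with hlen
  set Q : Int → Bool := fun l => decide ((p : Int) + l ≤ (n : Int)) &&
      (tbl.get? (String.ofList (PySem.List.slice L (some (p:Int)) (some ((p:Int) + l))))).isSome with hQ
  -- every length in the list comes from a nonempty key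
  have hlen_pos : ∀ l ∈ lengths, ∃ k : Nat, l = (k : Int) ∧ 1 ≤ k := by
    intro l hl
    rw [hlen, PySem.List.mem_sorted, PySem.Set.mem_ofList, List.mem_filterMap] at hl
    obtain ⟨key, _, hkey⟩ := hl
    by_cases hke : key = ""
    · simp [hke] at hkey
    · rw [if_neg hke] at hkey
      refine ⟨key.toList.length, (Option.some.injEq _ _).mp hkey |>.symm, ?_⟩
      by_contra h
      have hnil : key.toList = [] := List.length_eq_zero_iff.mp (by omega)
      exact hke (by simpa using congrArg String.ofList hnil)
  -- m₀'s slice is a key of length m₀, so (m₀ : Int) ∈ lengths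
  have hkeylen : ((L.drop p).take m₀).length = m₀ := by
    rw [List.length_take, List.length_drop]
    omega
  have hm₀mem' : ((m₀ : Nat) : Int) ∈ lengths := by
    rw [hlen, PySem.List.mem_sorted, PySem.Set.mem_ofList, List.mem_filterMap]
    refine ⟨String.ofList ((L.drop p).take m₀), ?_, ?_⟩
    · have : String.ofList ((L.drop p).take m₀) ∈ tbl.keys := by
        by_contra hnk
        rw [← PySem.Dict.get?_eq_none_iff_not_mem_keys] at hnk
        rw [hP] at hm₀P
        simp [hnk] at hm₀P
      simpa [htbl, PySem.Dict.keys, PySem.Dict.items] using this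
    · rw [if_neg, Option.some.injEq]
      · simp [hkeylen]
      · intro he
        have : ((L.drop p).take m₀) = [] := by
          have := congrArg String.toList he
          simpa using this
        rw [this] at hkeylen
        simp at hkeylen
        omega
  have hQm₀ : Q ((m₀ : Nat) : Int) = true := by
    rw [hQ]
    simp only [Bool.and_eq_true, decide_eq_true_eq]
    refine ⟨by exact_mod_cast (by omega : p + m₀ ≤ n), ?_⟩
    rw [hslice m₀]
    exact hm₀P
  -- lengths is strictly increasing, so find? returns the least qualifying length, which is m₀
  have hlensinc : lengths.Pairwise (· < ·) := by
    rw [hlen]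
    exact PySem.List.sorted_ofList_pairwise_lt _
  have hfindB : lengths.find? Q ≠ none := by
    intro hnone
    rw [List.find?_eq_none] at hnone
    exact absurd hQm₀ (by simpa using hnone _ hm₀mem')
  obtain ⟨l₀, hl₀⟩ := Option.ne_none_iff_exists'.mp hfindB
  have hl₀mem : l₀ ∈ lengths := List.mem_of_find?_eq_some hl₀
  have hl₀Q : Q l₀ = true := List.find?_some hl₀
  have hl₀le : l₀ ≤ (m₀ : Int) := pv_find?_le hlensinc hl₀ _ hm₀mem' hQm₀
  obtain ⟨k, hk, hk1⟩ := hlen_pos l₀ hl₀mem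
  have hkQ := hl₀Q
  rw [hQ, hk] at hkQ
  simp only [Bool.and_eq_true, decide_eq_true_eq] at hkQ
  obtain ⟨hkle, hksome⟩ := hkQ
  rw [hslice k] at hksome
  have hm₀lek : m₀ ≤ k := by
    have hpk : p + k ≤ n := by exact_mod_cast hkle
    apply hm₀min k
    · rw [List.mem_range']
      exact ⟨k - 1, by omega, by omega⟩
    · exact hksome
  have hl₀eq : l₀ = (m₀ : Int) := le_antisymm hl₀le (by rw [hk]; exact_mod_cast hm₀lek)
  -- assemble
  rw [hA, pvB_go_eq, hm₀, ← hQ, hl₀, hl₀eq]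
  dsimp only
  rw [hslice m₀]
  simp only [Prod.mk.injEq]
  exact ⟨trivial, by push_cast; ring⟩
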